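-- pv_equiv track=rewrite | github.com/blamevlan/depcheck | depcheck.py | pkg_name_only
-- ===== SOURCE A (Python) =====
-- def pkg_name_only(full):
--     """Remove epoch, version, release, arch from full NEVRA."""
--     # format: name-0:ver-rel.arch
--     parts = full.split("-")
--     # drop epoch from second part if present
--     name_parts = []
--     for p in parts:
--         if ":" in p:
--             break
--         name_parts.append(p)
--     return "-".join(name_parts) if name_parts else full.split("-")[0]
-- ===== SOURCE B (Python) =====
-- def pkg_name_only(full):
--     """Remove epoch, version, release, arch from full NEVRA."""
--     # index arithmetic on the first ':' instead of split/join of a parts list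
--     colon = full.find(":")
--     if colon == -1:
--         return full
--     dash = full.rfind("-", 0, colon)
--     if dash != -1:
--         return full[:dash]
--     # colon sits in the first '-'-segment: return that first segment
--     d0 = full.find("-")
--     return full if d0 == -1 else full[:d0]
-- ===== Notes on version B (the rewrite author's own statement) =====
-- stated objective: idiomatic
-- what changed: B replaces A's split-into-parts, break-loop and '-'.join reconstruction with direct index arithmetic: find the first ':', take the substring up to the last '-' before it (or the first segment / the whole string when no such dash / no colon exists), so no parts list is built or joined.
import Mathlib
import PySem

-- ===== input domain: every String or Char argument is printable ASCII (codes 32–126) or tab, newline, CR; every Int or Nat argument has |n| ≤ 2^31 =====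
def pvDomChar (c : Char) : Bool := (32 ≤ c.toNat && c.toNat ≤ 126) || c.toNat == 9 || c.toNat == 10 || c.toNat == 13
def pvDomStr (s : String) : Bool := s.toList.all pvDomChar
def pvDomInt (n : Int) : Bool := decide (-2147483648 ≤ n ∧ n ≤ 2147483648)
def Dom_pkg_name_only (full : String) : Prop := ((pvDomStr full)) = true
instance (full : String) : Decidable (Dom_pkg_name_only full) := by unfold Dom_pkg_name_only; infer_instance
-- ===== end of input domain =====

-- B replaces A's split-into-parts/break-loop/'-'.join with direct index arithmetic on the
-- first ':' and the last '-' before it (objective: idiomatic; same O(n) cost).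

-- ===== PORT A =====
-- the 'for p in parts: if ":" in p: break; name_parts.append(p)' loop
def pkgLoop : List (List Char) → List (List Char)
  | [] => []
  | p :: ps => if PySem.Chars.isIn [':'] p then [] else p :: pkgLoop ps

def pkg_name_only (full : String) : String :=
  let parts := PySem.Chars.splitOn full.toList ['-']
  let name_parts := pkgLoop parts
  if name_parts.isEmpty then
    -- 'full.split("-")[0]'; splitOn never returns [], so the [] branch is unreachable
    match PySem.Chars.splitOn full.toList ['-'] with
    | [] => ""
    | p :: _ => String.ofList p
  else String.ofList (PySem.Chars.join ['-'] name_parts)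

-- ===== PORT B =====
def pkg_name_only_alt (full : String) : String :=
  let colon := PySem.Str.find full ":"
  if colon = -1 then full
  else
    let dash := PySem.Str.rfindFrom full "-" 0 (some colon)
    if dash ≠ -1 then PySem.Str.slice full none (some dash)
    else
      let d0 := PySem.Str.find full "-"
      if d0 = -1 then full else PySem.Str.slice full none (some d0)

-- ===== PRECONDITION & SPEC =====
def Spec_pkg_name_only (full : String) (out : String) : Prop := out = pkg_name_only_alt full
instance (full : String) (out : String) : Decidable (Spec_pkg_name_only full out) := by unfold Spec_pkg_name_only; infer_instance

-- ===== CLAIM (what is proved, stated in full; the proofs are below) =====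
def Claim_equal_pkg_name_only : Prop := ∀ (full : String), Dom_pkg_name_only full → Spec_pkg_name_only full (pkg_name_only full)

-- ===== LEMMAS AND PROOFS =====

-- proof-side model of full.split("-")
def sp : List Char → List (List Char)
  | [] => [[]]
  | x :: t => if x = '-' then [] :: sp t else
      match sp t with
      | [] => [[x]]
      | h :: r => (x :: h) :: r

theorem sp_dash (t : List Char) : sp ('-' :: t) = [] :: sp t := by
  simp [sp]

theorem sp_ne_nil (l : List Char) : sp l ≠ [] := by
  cases l with
  | nil => simp [sp]
  | cons x t =>
    simp only [sp]
    split
    · simp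
    · split <;> simp_all

theorem sp_cons (x : Char) (t h : List Char) (r : List (List Char)) (hx : ¬ x = '-')
    (hs : sp t = h :: r) : sp (x :: t) = (x :: h) :: r := by
  simp only [sp, if_neg hx, hs]

theorem sp_exists (t : List Char) : ∃ h r, sp t = h :: r := by
  cases hs : sp t with
  | nil => exact absurd hs (sp_ne_nil t)
  | cons a b => exact ⟨a, b, rfl⟩

theorem splitOn_go_eq (fuel : Nat) (l cur : List Char) (acc : List (List Char))
    (h : l.length ≤ fuel) :
    PySem.Chars.splitOn.go ['-'] fuel l cur acc =
      acc.reverse ++ (match sp l with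
        | [] => []
        | h :: r => (cur.reverse ++ h) :: r) := by
  induction fuel generalizing l cur acc with
  | zero =>
    have hl : l = [] := by cases l <;> simp_all
    subst hl
    simp [PySem.Chars.splitOn.go, sp]
  | succ n ih =>
    cases l with
    | nil => simp [PySem.Chars.splitOn.go, sp]
    | cons c rest =>
      simp only [List.length_cons, Nat.succ_le_succ_iff] at h
      simp only [PySem.Chars.splitOn.go]
      by_cases hc : c = '-'
      · subst hc
        rw [if_pos (by simp [List.isPrefixOf])]
        obtain ⟨h', r', hs⟩ := sp_exists rest
        rw [show List.drop ['-'].length ('-' :: rest) = rest from rfl,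
            ih rest [] (List.reverse cur :: acc) h]
        simp [sp_dash, hs]
      · rw [if_neg (by simp [List.isPrefixOf]; exact fun e => hc e.symm)]
        obtain ⟨h', r', hs⟩ := sp_exists rest
        rw [ih rest (c :: cur) acc h]
        rw [sp_cons c rest h' r' hc hs, hs]
        simp

theorem splitOn_eq (l : List Char) : PySem.Chars.splitOn l ['-'] = sp l := by
  obtain ⟨h, r, hs⟩ := sp_exists l
  rw [PySem.Chars.splitOn, splitOn_go_eq (l.length + 1) l [] [] (by omega), hs]
  simp

theorem sp_nodash (a : List Char) (h : '-' ∉ a) : sp a = [a] := by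
  induction a with
  | nil => rfl
  | cons x t ih =>
    simp only [List.mem_cons, not_or] at h
    have hx : ¬ x = '-' := fun e => h.1 e.symm
    rw [sp_cons x t t [] hx (ih h.2)]

theorem sp_append (a b : List Char) : sp (a ++ '-' :: b) = sp a ++ sp b := by
  induction a with
  | nil => simp [sp_dash, sp]
  | cons x t ih =>
    by_cases hx : x = '-'
    · subst hx
      rw [List.cons_append, sp_dash, sp_dash, ih]
      simp
    · obtain ⟨h, r, hs⟩ := sp_exists t
      obtain ⟨h2, r2, hs2⟩ := sp_exists (t ++ '-' :: b)
      rw [List.cons_append, sp_cons x _ h2 r2 hx hs2, sp_cons x t h r hx hs]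
      rw [hs, hs2, List.cons_append] at ih
      injection ih with ih1 ih2
      simp [List.cons_append, ih1, ih2]

theorem sp_join (l : List Char) : PySem.Chars.join ['-'] (sp l) = l := by
  induction l with
  | nil => rw [show sp [] = [[]] from rfl, PySem.Chars.join_singleton]
  | cons x t ih =>
    obtain ⟨h, r, hs⟩ := sp_exists t
    rw [hs] at ih
    by_cases hx : x = '-'
    · subst hx
      rw [sp_dash, hs, PySem.Chars.join_cons_cons, ← hs, hs, ih]
      simp
    · rw [sp_cons x t h r hx hs]
      cases r with
      | nil =>
        rw [PySem.Chars.join_singleton] at ih ⊢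
        simp [ih]
      | cons h2 r2 =>
        rw [PySem.Chars.join_cons_cons] at ih ⊢
        simp [ih]

theorem sp_subset (l : List Char) : ∀ p ∈ sp l, ∀ x ∈ p, x ∈ l := by
  induction l with
  | nil =>
    intro p hp x hx
    simp [sp] at hp
    subst hp; simp at hx
  | cons y t ih =>
    intro p hp x hx
    by_cases hy : y = '-'
    · subst hy
      rw [sp_dash] at hp
      rcases List.mem_cons.mp hp with h1 | h1
      · subst h1; simp at hx
      · exact List.mem_cons_of_mem _ (ih p h1 x hx)
    · obtain ⟨h, r, hs⟩ := sp_exists t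
      rw [sp_cons y t h r hy hs] at hp
      rcases List.mem_cons.mp hp with h1 | h1
      · subst h1
        rcases List.mem_cons.mp hx with h2 | h2
        · simp [h2]
        · exact List.mem_cons_of_mem _ (ih h (by simp [hs]) x h2)
      · exact List.mem_cons_of_mem _ (ih p (by simp [hs, h1]) x hx)

theorem sp_head (l : List Char) : ∃ r, sp l = (l.takeWhile (· ≠ '-')) :: r := by
  induction l with
  | nil => exact ⟨[], rfl⟩
  | cons x t ih =>
    by_cases hx : x = '-'
    · subst hx
      exact ⟨sp t, by simp [sp_dash, List.takeWhile]⟩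
    · obtain ⟨r, hr⟩ := ih
      refine ⟨r, ?_⟩
      rw [sp_cons x t _ r hx hr]
      simp [List.takeWhile, hx]

theorem colon_mem_takeWhile (p2 post : List Char) (h : '-' ∉ p2) :
    ':' ∈ (p2 ++ ':' :: post).takeWhile (· ≠ '-') := by
  induction p2 with
  | nil =>
    rw [List.nil_append, List.takeWhile_cons_of_pos (by decide)]
    simp
  | cons x t ih =>
    simp only [List.mem_cons, not_or] at h
    have hx : x ≠ '-' := fun e => h.1 e.symm
    rw [List.cons_append, List.takeWhile_cons_of_pos (by simpa using hx)]
    exact List.mem_cons_of_mem _ (ih h.2)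

-- pkgLoop facts
theorem pkgLoop_append (ps qs : List (List Char)) (h : ∀ p ∈ ps, ':' ∉ p) :
    pkgLoop (ps ++ qs) = ps ++ pkgLoop qs := by
  induction ps with
  | nil => rfl
  | cons p t ih =>
    have h1 : PySem.Chars.isIn [':'] p = false := by
      rw [PySem.Chars.isIn_eq_false_iff, List.singleton_infix_iff]
      exact h p (by simp)
    simp [pkgLoop, h1, ih fun q hq => h q (by simp [hq])]

theorem pkgLoop_all (ps : List (List Char)) (h : ∀ p ∈ ps, ':' ∉ p) : pkgLoop ps = ps := by
  induction ps with
  | nil => rfl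
  | cons p t ih =>
    have h1 : PySem.Chars.isIn [':'] p = false := by
      rw [PySem.Chars.isIn_eq_false_iff, List.singleton_infix_iff]
      exact h p (by simp)
    simp [pkgLoop, h1, ih fun q hq => h q (by simp [hq])]

theorem pkgLoop_colon (p : List Char) (ps : List (List Char)) (h : ':' ∈ p) :
    pkgLoop (p :: ps) = [] := by
  have h1 : PySem.Chars.isIn [':'] p = true := by
    rw [PySem.Chars.isIn_iff_infix, List.singleton_infix_iff]; exact h
  simp [pkgLoop, h1]

-- find / rfind with a single-character needle
theorem prefix_singleton_head (c x : Char) (l : List Char) (hx : ¬ c = x) :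
    [c].isPrefixOf (x :: l) = false := by
  simp [List.isPrefixOf, hx]

theorem prefix_singleton_not_mem (c : Char) (l : List Char) (h : c ∉ l) :
    [c].isPrefixOf l = false := by
  cases l with
  | nil => rfl
  | cons x t =>
    simp only [List.mem_cons, not_or] at h
    exact prefix_singleton_head c x t h.1

theorem find_not_mem (l : List Char) (c : Char) (h : c ∉ l) : PySem.Chars.find l [c] = -1 := by
  rw [PySem.Chars.find_eq_neg_one_iff, List.singleton_infix_iff]; exact h

theorem find_go_first (c : Char) (pre : List Char) (h : c ∉ pre) (post : List Char) (k : Nat) :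
    PySem.Chars.find.go [c] (pre ++ c :: post) k = (k : Int) + pre.length := by
  induction pre generalizing k with
  | nil =>
    simp only [List.nil_append, PySem.Chars.find.go]
    rw [if_pos (by simp [List.isPrefixOf])]
    simp
  | cons x t ih =>
    simp only [List.mem_cons, not_or] at h
    simp only [List.cons_append, PySem.Chars.find.go]
    rw [prefix_singleton_head c x _ h.1]
    simp only [Bool.false_eq_true, if_false]
    rw [ih h.2 (k + 1)]
    simp only [List.length_cons]
    push_cast
    ring

theorem find_first (c : Char) (pre post : List Char) (h : c ∉ pre) :
    PySem.Chars.find (pre ++ c :: post) [c] = pre.length := by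
  have := find_go_first c pre h post 0
  rw [PySem.Chars.find, this]
  simp

theorem rfind_go_not_mem (s : List Char) (c : Char) (h : c ∉ s) (j : Nat) :
    PySem.Chars.rfind.go s [c] j = -1 := by
  induction j with
  | zero =>
    simp only [PySem.Chars.rfind.go, prefix_singleton_not_mem c s h,
      Bool.false_eq_true, if_false]
  | succ n ih =>
    simp only [PySem.Chars.rfind.go,
      prefix_singleton_not_mem c _ (fun hm => h (List.mem_of_mem_drop hm)),
      Bool.false_eq_true, if_false]
    exact ih

theorem rfind_not_mem (s : List Char) (c : Char) (h : c ∉ s) :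
    PySem.Chars.rfind s [c] = -1 := by
  rw [PySem.Chars.rfind]
  exact rfind_go_not_mem s c h s.length

theorem rfind_go_last (c : Char) (p1 p2 : List Char) (h : c ∉ p2) (k : Nat) :
    PySem.Chars.rfind.go (p1 ++ c :: p2) [c] (p1.length + k) = p1.length := by
  induction k with
  | zero =>
    cases hp : p1 with
    | nil =>
      simp only [List.nil_append, List.length_nil, Nat.zero_add, PySem.Chars.rfind.go]
      rw [if_pos (by simp [List.isPrefixOf])]
      simp
    | cons x t =>
      have hd : List.drop (t.length + 1) ((x :: t) ++ c :: p2) = c :: p2 := by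
        rw [show t.length + 1 = (x :: t).length from rfl, List.drop_left]
      simp only [List.length_cons, Nat.add_zero, PySem.Chars.rfind.go, hd]
      rw [if_pos (by simp [List.isPrefixOf])]
  | succ n ih =>
    have harm : p1.length + (n + 1) = (p1.length + n) + 1 := by omega
    rw [harm]
    simp only [PySem.Chars.rfind.go]
    have hd : List.drop (p1.length + n + 1) (p1 ++ c :: p2) = List.drop (n + 1) (c :: p2) := by
      rw [List.drop_append, List.drop_eq_nil_of_le (by omega), List.nil_append]
      congr 1
      omega
    rw [hd, show List.drop (n + 1) (c :: p2) = List.drop n p2 from rfl,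
        prefix_singleton_not_mem c _ (fun hm => h (List.mem_of_mem_drop hm))]
    simpa using ih

theorem rfind_last (c : Char) (p1 p2 : List Char) (h : c ∉ p2) :
    PySem.Chars.rfind (p1 ++ c :: p2) [c] = p1.length := by
  have hl : (p1 ++ c :: p2).length = p1.length + (p2.length + 1) := by
    simp only [List.length_append, List.length_cons]
  rw [PySem.Chars.rfind, hl]
  exact rfind_go_last c p1 p2 h (p2.length + 1)

theorem rfindFrom_eval (l sub : List Char) (e : Nat) (he : e ≤ l.length) :
    PySem.Chars.rfindFrom l sub 0 (some (e : Int)) =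
      (if PySem.Chars.rfind (l.take e) sub = -1 then -1
       else (0 : Int) + PySem.Chars.rfind (l.take e) sub) := by
  have h1 : ¬ ((l.length : Int) < (e : Int)) := by exact_mod_cast Nat.not_lt.mpr he
  have h2 : ¬ ((e : Int) < 0) := by omega
  simp [PySem.Chars.rfindFrom, h1, h2]

-- first/last occurrence decompositions
theorem exists_first_split (c : Char) (l : List Char) (hmem : c ∈ l) :
    ∃ pre post, l = pre ++ c :: post ∧ c ∉ pre := by
  induction l with
  | nil => simp at hmem
  | cons x t ih =>
    by_cases hx : x = c
    · exact ⟨[], t, by simp [hx], by simp⟩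
    · have ht : c ∈ t := by
        rcases List.mem_cons.mp hmem with h1 | h1
        · exact absurd h1.symm hx
        · exact h1
      obtain ⟨pre, post, h1, h2⟩ := ih ht
      refine ⟨x :: pre, post, by simp [h1], ?_⟩
      simp only [List.mem_cons, not_or]
      exact ⟨fun hc => hx hc.symm, h2⟩

theorem exists_last_split (c : Char) (l : List Char) (hmem : c ∈ l) :
    ∃ p1 p2, l = p1 ++ c :: p2 ∧ c ∉ p2 := by
  induction l with
  | nil => simp at hmem
  | cons x t ih =>
    by_cases ht : c ∈ t
    · obtain ⟨p1, p2, h1, h2⟩ := ih ht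
      exact ⟨x :: p1, p2, by simp [h1], h2⟩
    · have hx : x = c := by
        rcases List.mem_cons.mp hmem with h1 | h1
        · exact h1.symm
        · exact absurd h1 ht
      exact ⟨[], t, by simp [hx], ht⟩

theorem first_split_unique (a b cl d : List Char) (x y : Char)
    (h : a ++ x :: b = cl ++ y :: d) (hx : x ∉ cl) (hy : y ∉ a) : x = y ∧ a = cl := by
  induction a generalizing cl with
  | nil =>
    cases cl with
    | nil => simp_all
    | cons z c' =>
      simp only [List.nil_append, List.cons_append, List.cons.injEq] at h
      exact absurd (by simp [h.1]) hx
  | cons w a' ih =>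
    cases cl with
    | nil =>
      simp only [List.cons_append, List.nil_append, List.cons.injEq] at h
      exact absurd (by simp [h.1]) hy
    | cons z c' =>
      simp only [List.cons_append, List.cons.injEq] at h
      have := ih c' h.2 (fun hm => hx (List.mem_cons_of_mem _ hm))
        (fun hm => hy (List.mem_cons_of_mem _ hm))
      exact ⟨this.1, by simp [h.1, this.2]⟩

theorem main_eq (full : String) : pkg_name_only full = pkg_name_only_alt full := by
  have hcl : ":".toList = [':'] := by decide
  have hdl : "-".toList = ['-'] := by decide
  simp only [pkg_name_only, pkg_name_only_alt, PySem.Str.find, PySem.Str.rfindFrom,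
    PySem.Str.slice, PySem.Chars.slice, hcl, hdl, splitOn_eq]
  by_cases hcol : ':' ∈ full.toList
  · obtain ⟨pre, post, hl0, hpre⟩ := exists_first_split ':' full.toList hcol
    by_cases hdash : '-' ∈ pre
    · -- 2a: a '-' before the first ':'
      obtain ⟨p1, p2, hp, hp2⟩ := exists_last_split '-' pre hdash
      subst hp
      rw [hl0]
      rw [find_first ':' (p1 ++ '-' :: p2) post hpre]
      rw [if_neg (by omega : ¬(((p1 ++ '-' :: p2).length : Int) = -1))]
      rw [rfindFrom_eval _ ['-'] (p1 ++ '-' :: p2).length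
        (by simp only [List.length_append, List.length_cons]; omega)]
      rw [List.take_left, rfind_last '-' p1 p2 hp2]
      rw [if_neg (by omega : ¬((p1.length : Int) = -1))]
      rw [if_pos (by omega : (0 : Int) + (p1.length : Int) ≠ -1)]
      have hB : PySem.List.slice ((p1 ++ '-' :: p2) ++ ':' :: post) none
          (some ((0 : Int) + (p1.length : Int))) = p1 := by
        rw [zero_add, PySem.List.slice_to _ (show (0 : Int) ≤ (p1.length : Int) by omega),
          Int.toNat_natCast, List.append_assoc]
        exact List.take_left' rfl
      rw [hB]
      -- A side
      have hassoc : (p1 ++ '-' :: p2) ++ ':' :: post = p1 ++ '-' :: (p2 ++ ':' :: post) := by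
        simp
      rw [hassoc, sp_append]
      obtain ⟨r, hr⟩ := sp_head (p2 ++ ':' :: post)
      have hp1free : ∀ p ∈ sp p1, ':' ∉ p := by
        intro p hpmem hc
        exact hpre (List.mem_append_left _ (sp_subset p1 p hpmem ':' hc))
      rw [hr, pkgLoop_append _ _ hp1free,
          pkgLoop_colon _ r (colon_mem_takeWhile p2 post hp2)]
      rw [if_neg (by simp [List.isEmpty_iff, sp_ne_nil])]
      rw [List.append_nil, sp_join]
    · -- 2b: no '-' before the first ':'
      rw [hl0]
      rw [find_first ':' pre post hpre]
      rw [if_neg (by omega : ¬((pre.length : Int) = -1))]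
      rw [rfindFrom_eval _ ['-'] pre.length
        (by simp only [List.length_append, List.length_cons]; omega)]
      rw [List.take_left, rfind_not_mem pre '-' hdash]
      rw [if_pos (rfl : (-1 : Int) = -1)]
      rw [if_neg (by simp : ¬((-1 : Int) ≠ -1))]
      by_cases hd : '-' ∈ pre ++ ':' :: post
      · -- 2b-ii: first '-' is after the ':'
        obtain ⟨e1, e2, he, he1⟩ := exists_first_split '-' (pre ++ ':' :: post) hd
        have hcol1 : ':' ∈ e1 := by
          by_contra hno
          have := first_split_unique e1 e2 pre post '-' ':' he.symm hdash hno
          exact absurd this.1 (by decide)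
        rw [he, find_first '-' e1 e2 he1]
        rw [if_neg (by omega : ¬((e1.length : Int) = -1))]
        have hB : PySem.List.slice (e1 ++ '-' :: e2) none (some ((e1.length : Int))) = e1 := by
          rw [PySem.List.slice_to _ (show (0 : Int) ≤ (e1.length : Int) by omega),
            Int.toNat_natCast, List.take_left]
        rw [hB, sp_append, sp_nodash e1 he1, List.singleton_append,
            pkgLoop_colon e1 _ hcol1]
        rw [if_pos List.isEmpty_nil]
      · -- 2b-i: no '-' at all
        rw [find_not_mem _ '-' hd, if_pos (rfl : (-1 : Int) = -1)]
        rw [sp_nodash _ hd, pkgLoop_colon _ [] (by simp)]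
        rw [if_pos List.isEmpty_nil]
        rw [← hl0]
        exact String.ofList_toList
  · -- 1: no ':' anywhere
    rw [find_not_mem _ ':' hcol, if_pos (rfl : (-1 : Int) = -1)]
    have hall : pkgLoop (sp full.toList) = sp full.toList :=
      pkgLoop_all _ (fun p hp hc => hcol (sp_subset full.toList p hp ':' hc))
    rw [hall, if_neg (by simp [List.isEmpty_iff, sp_ne_nil]), sp_join]
    exact String.ofList_toList

-- ===== VERDICT (by name: the statement is the Claim_ definition above) =====
theorem pkg_name_only_spec : Claim_equal_pkg_name_only := by
  intro full _
  unfold Spec_pkg_name_only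
  exact main_eq full
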